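-- pv_equiv track=rewrite | github.com/cartkid/advent-of-code | src/year_2022/day_6/code.py | is_fully_contained
-- ===== SOURCE A (Python) =====
-- def is_fully_contained(l1: list[str], l2: list[str], part_two: bool = False) -> bool:
--     temp_l1: list[str] = l1
--     temp_l2: list[str] = l2
--
--     if len(l2) > len(l1):
--         temp_l1 = l2
--         temp_l2 = l1
--
--     for i in temp_l2:
--         if part_two is False and i not in temp_l1:
--             return False
--         elif part_two is True and i in temp_l1:
--             return True
--
--     if part_two is False:
--         return True
--     else:
--         return False
-- ===== SOURCE B (Python) =====
-- def is_fully_contained(l1: list[str], l2: list[str], part_two: bool = False) -> bool: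
--     # Inclusion-exclusion on distinct-element counts: no element-by-element
--     # membership loop, no subset/intersection operator.
--     u = len(set(l1) | set(l2))
--     if part_two:
--         # overlap exists  iff  |l1 u l2| < |set(l1)| + |set(l2)|
--         return u < len(set(l1)) + len(set(l2))
--     # the shorter list is contained in the longer  iff  the union adds nothing
--     # beyond the longer list's distinct elements: |l1 u l2| == |set(big)|
--     big = l2 if len(l2) > len(l1) else l1
--     return u == len(set(big))
-- ===== Notes on version B (the rewrite author's own statement) =====
-- stated objective: alternative
-- what changed: Replaces A's element-by-element membership loop with early returns by inclusion-exclusion arithmetic on distinct-element counts: overlap iff len(set(l1))+len(set(l2)) exceeds len(set(l1)|set(l2)), containment iff the union's cardinality equals the longer list's distinct count.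
import Mathlib
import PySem

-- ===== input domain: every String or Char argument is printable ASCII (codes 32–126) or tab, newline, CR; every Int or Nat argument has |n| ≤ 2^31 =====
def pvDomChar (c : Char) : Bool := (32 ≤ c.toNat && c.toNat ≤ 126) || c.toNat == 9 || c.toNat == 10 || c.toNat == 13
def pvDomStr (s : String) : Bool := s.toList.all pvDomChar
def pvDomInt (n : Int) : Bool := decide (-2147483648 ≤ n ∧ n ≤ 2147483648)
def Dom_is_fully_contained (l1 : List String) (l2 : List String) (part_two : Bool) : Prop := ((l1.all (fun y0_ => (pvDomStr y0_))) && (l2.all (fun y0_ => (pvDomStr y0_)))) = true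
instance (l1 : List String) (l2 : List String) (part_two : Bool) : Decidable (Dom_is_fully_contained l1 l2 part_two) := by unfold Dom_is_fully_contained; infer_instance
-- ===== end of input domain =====

-- ===== PORT A =====
-- B drops A's membership loop for inclusion–exclusion on distinct-element counts; objective: alternative.
def isfcLoop (tempL1 : List String) (part_two : Bool) : List String → Bool
  | [] => if part_two = false then true else false
  | i :: rest =>
    if part_two = false && !(tempL1.contains i) then false
    else if part_two = true && tempL1.contains i then true
    else isfcLoop tempL1 part_two rest

def is_fully_contained (l1 : List String) (l2 : List String) (part_two : Bool) : Bool :=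
  let temp_l1 := if l2.length > l1.length then l2 else l1
  let temp_l2 := if l2.length > l1.length then l1 else l2
  isfcLoop temp_l1 part_two temp_l2

-- ===== PORT B =====
def is_fully_contained_alt (l1 : List String) (l2 : List String) (part_two : Bool) : Bool :=
  let s1 : PySem.Set String := PySem.Set.ofList l1
  let s2 : PySem.Set String := PySem.Set.ofList l2
  let u : Int := PySem.Set.len (PySem.Set.union s1 s2)
  if part_two then decide (u < PySem.Set.len s1 + PySem.Set.len s2)
  else
    let big := if l2.length > l1.length then l2 else l1
    decide (u = PySem.Set.len (PySem.Set.ofList big))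

-- ===== PRECONDITION & SPEC =====
def Spec_is_fully_contained (l1 : List String) (l2 : List String) (part_two : Bool) (out : Bool) : Prop := out = is_fully_contained_alt l1 l2 part_two
instance (l1 : List String) (l2 : List String) (part_two : Bool) (out : Bool) : Decidable (Spec_is_fully_contained l1 l2 part_two out) := by unfold Spec_is_fully_contained; infer_instance

-- ===== CLAIM =====
def Claim_equal_is_fully_contained : Prop := ∀ (l1 : List String) (l2 : List String) (part_two : Bool), Dom_is_fully_contained l1 l2 part_two → Spec_is_fully_contained l1 l2 part_two (is_fully_contained l1 l2 part_two)

-- ===== LEMMAS AND PROOFS =====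
theorem isfcLoop_eq (big : List String) (pt : Bool) (small : List String) :
    isfcLoop big pt small =
      (if pt then small.any (fun i => big.contains i)
       else small.all (fun i => big.contains i)) := by
  induction small with
  | nil => cases pt <;> simp [isfcLoop]
  | cons i rest ih =>
    cases pt <;> by_cases h : big.contains i = true <;>
      simp [isfcLoop, ih]

theorem len_union_left (xs ys : List String) :
    (PySem.Set.union (PySem.Set.ofList xs) (PySem.Set.ofList ys)).length =
      (PySem.Set.ofList xs).length +
        (((PySem.Set.ofList ys)).filter
          (fun y => !(PySem.Set.contains (PySem.Set.ofList xs) y))).length := by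
  show ((PySem.Set.ofList xs).update (PySem.Set.ofList ys)).length = _
  rw [PySem.Set.update_eq_append_filter, List.length_append, PySem.Set.ofList_ofList]

theorem len_union_comm (xs ys : List String) :
    (PySem.Set.union (PySem.Set.ofList xs) (PySem.Set.ofList ys)).length =
      (PySem.Set.union (PySem.Set.ofList ys) (PySem.Set.ofList xs)).length := by
  apply List.Perm.length_eq
  rw [List.perm_ext_iff_of_nodup
    (PySem.Set.nodup_union _ _ (PySem.Set.nodup_ofList _))
    (PySem.Set.nodup_union _ _ (PySem.Set.nodup_ofList _))]
  intro a
  simp [PySem.Set.mem_union, PySem.Set.mem_ofList, or_comm]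

theorem len_union_eq_left_iff (xs ys : List String) :
    (PySem.Set.union (PySem.Set.ofList xs) (PySem.Set.ofList ys)).length =
      (PySem.Set.ofList xs).length ↔ ∀ y ∈ ys, y ∈ xs := by
  rw [len_union_left]
  constructor
  · intro h y hy
    have hf : (((PySem.Set.ofList ys)).filter
        (fun y => !(PySem.Set.contains (PySem.Set.ofList xs) y))).length = 0 := by omega
    rw [List.length_eq_zero_iff, List.filter_eq_nil_iff] at hf
    have := hf y ((PySem.Set.mem_ofList _ _).mpr hy)
    simpa [PySem.Set.contains_iff, PySem.Set.mem_ofList] using this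
  · intro h
    have hf : (((PySem.Set.ofList ys)).filter
        (fun y => !(PySem.Set.contains (PySem.Set.ofList xs) y))) = [] := by
      rw [List.filter_eq_nil_iff]
      intro y hy
      simp only [Bool.not_eq_true']
      have : y ∈ xs := h y ((PySem.Set.mem_ofList _ _).mp hy)
      simp [PySem.Set.mem_ofList, this]
    rw [hf]; simp

theorem len_union_lt_iff (xs ys : List String) :
    (PySem.Set.union (PySem.Set.ofList xs) (PySem.Set.ofList ys)).length <
      (PySem.Set.ofList xs).length + (PySem.Set.ofList ys).length ↔
      ∃ y ∈ ys, y ∈ xs := by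
  rw [len_union_left, Nat.add_lt_add_iff_left, List.length_filter_lt_length_iff_exists]
  constructor
  · rintro ⟨y, hy, hny⟩
    exact ⟨y, (PySem.Set.mem_ofList _ _).mp hy,
      by simpa [PySem.Set.contains_iff, PySem.Set.mem_ofList] using hny⟩
  · rintro ⟨y, hy, hyx⟩
    exact ⟨y, (PySem.Set.mem_ofList _ _).mpr hy,
      by simp [PySem.Set.mem_ofList, hyx]⟩

theorem set_len_eq (s : PySem.Set String) : PySem.Set.len s = (s.length : Int) := rfl

-- ===== VERDICT =====
theorem is_fully_contained_spec : Claim_equal_is_fully_contained := by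
  intro l1 l2 pt _
  unfold Spec_is_fully_contained is_fully_contained is_fully_contained_alt
  rw [isfcLoop_eq]
  cases pt
  · -- part one: subset test
    simp only [if_false, Bool.false_eq_true]
    rw [Bool.eq_iff_iff, List.all_eq_true, decide_eq_true_iff, set_len_eq, set_len_eq]
    rw [show ∀ a b : ℕ, ((a : Int) = b ↔ a = b) from fun a b => by omega]
    by_cases h : l2.length > l1.length
    · simp only [if_pos h]
      rw [len_union_comm, len_union_eq_left_iff]
      simp
    · simp only [if_neg h]
      rw [len_union_eq_left_iff]
      simp
  · -- part two: overlap test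
    simp only [if_true]
    rw [Bool.eq_iff_iff, List.any_eq_true, decide_eq_true_iff, set_len_eq, set_len_eq, set_len_eq]
    rw [show ∀ a b c : ℕ, ((a : Int) < b + c ↔ a < b + c) from fun a b c => by omega]
    rw [len_union_lt_iff]
    simp only [List.contains_eq_mem, decide_eq_true_eq]
    by_cases h : l2.length > l1.length
    · simp only [if_pos h]
      exact ⟨fun ⟨y, a, b⟩ => ⟨y, b, a⟩, fun ⟨y, a, b⟩ => ⟨y, b, a⟩⟩
    · simp only [if_neg h]
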